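-- pv_equiv track=rewrite | github.com/AlisonOuellet/GenomicResistancePredictor | scripts/preprocess_data.py | _kmer_counts
-- ===== SOURCE A (Python) =====
-- from typing import List, Dict, Iterable, Tuple, Optional
--
-- AA_ALPHABET = "ACDEFGHIKLMNPQRSTVWY" # 20 standard amino acids
--
-- def _clean_dna(seq: str) -> str:
--     s = seq.upper().replace("U", "T")
--     return "".join(ch if ch in {"A", "C", "G", "T", "N"} else "N" for ch in s)
--
-- def _clean_aa(seq: str) -> str:
--     s = seq.upper().replace("U", "C")
--     return "".join(ch if ch in set(AA_ALPHABET) else "X" for ch in s)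
--
-- def _iter_kmers(seq: str, k: int) -> Iterable[str]:
--     for i in range(0, len(seq) - k + 1):
--         yield seq[i:i+k]
--
-- def _kmer_counts(seq: str, k: int, is_dna: bool = True) -> Dict[str, int]:
--     seq = _clean_dna(seq) if is_dna else _clean_aa(seq)
--     skip_char = "N" if is_dna else "X"
--     bag: Dict[str, int] = {}
--     for kmer in _iter_kmers(seq, k):
--         if skip_char in kmer:
--             continue
--         bag[kmer] = bag.get(kmer, 0) + 1
--     return bag
-- ===== SOURCE B (Python) =====
-- AA_ALPHABET = "ACDEFGHIKLMNPQRSTVWY"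
--
-- def _clean(seq, is_dna):
--     if is_dna:
--         s = seq.upper().replace("U", "T")
--         keep, repl = "ACGTN", "N"
--     else:
--         s = seq.upper().replace("U", "C")
--         keep, repl = AA_ALPHABET, "X"
--     return "".join(c if c in keep else repl for c in s)
--
-- def _kmer_counts(seq, k, is_dna=True):
--     # There are no k-mers of non-positive length: reject k < 1 up front,
--     # then split the cleaned sequence on the ambiguity character into
--     # skip-free segments and slide a k-window over each segment.
--     if k < 1:
--         return {}
--     s = _clean(seq, is_dna)
--     skip_char = "N" if is_dna else "X"
--     bag = {}
--     for seg in s.split(skip_char):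
--         for i in range(len(seg) - k + 1):
--             kmer = seg[i:i+k]
--             bag[kmer] = bag.get(kmer, 0) + 1
--     return bag
-- ===== Notes on version B (the rewrite author's own statement) =====
-- stated objective: alternative
-- what changed: A slides a k-window over the whole cleaned sequence and tests every window for the ambiguity character; B splits the cleaned sequence on the ambiguity character into skip-free segments once and windows each segment with no per-window membership test, rejecting k < 1 up front.
-- outside the precondition, e.g. on _kmer_counts('A', 0, True): A returns {'': 2}, B returns {}; on _kmer_counts('ACGTA', -3, True): A returns {'AC': 1, 'CG': 1, 'GT': 1, '': 6}, B returns {}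
import Mathlib
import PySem

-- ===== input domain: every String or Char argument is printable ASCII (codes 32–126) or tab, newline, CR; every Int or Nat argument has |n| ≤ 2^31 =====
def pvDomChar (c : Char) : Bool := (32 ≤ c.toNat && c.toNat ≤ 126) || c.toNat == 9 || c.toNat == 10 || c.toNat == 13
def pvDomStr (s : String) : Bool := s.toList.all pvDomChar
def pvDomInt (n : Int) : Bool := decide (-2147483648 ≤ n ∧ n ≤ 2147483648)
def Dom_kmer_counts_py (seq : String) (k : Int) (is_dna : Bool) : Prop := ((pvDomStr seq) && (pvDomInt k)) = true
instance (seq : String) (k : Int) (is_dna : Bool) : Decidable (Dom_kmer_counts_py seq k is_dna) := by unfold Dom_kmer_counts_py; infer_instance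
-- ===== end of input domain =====

-- B counts k-mers by splitting the cleaned sequence on the ambiguity character into skip-free
-- segments and windowing each segment (no per-window membership test), rejecting k < 1 up front;
-- Pre_ below restricts to the natural domain k >= 1.

-- ===== PORT A =====
def pvAA_ALPHABET : String := "ACDEFGHIKLMNPQRSTVWY"

-- ''.join(ch if … else 'N' for ch in s) over one-char pieces is ported as a per-character map (exact)
def clean_dna_py (seq : String) : List Char :=
  let s := PySem.Chars.replace (PySem.Chars.upper seq.toList) ['U'] ['T']
  s.map (fun ch => if ch ∈ ['A', 'C', 'G', 'T', 'N'] then ch else 'N')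

def clean_aa_py (seq : String) : List Char :=
  let s := PySem.Chars.replace (PySem.Chars.upper seq.toList) ['U'] ['C']
  s.map (fun ch => if ch ∈ pvAA_ALPHABET.toList then ch else 'X')

def iter_kmers_py (s : List Char) (k : Int) : List (List Char) :=
  (PySem.List.pyRange 0 ((s.length : Int) - k + 1) 1).map
    (fun i => PySem.List.slice s (some i) (some (i + k)))

def kmer_counts_py (seq : String) (k : Int) (is_dna : Bool) : List (String × Int) :=
  let s := if is_dna then clean_dna_py seq else clean_aa_py seq
  let skip : Char := if is_dna then 'N' else 'X'
  let bag : PySem.Dict String Int :=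
    (iter_kmers_py s k).foldl
      (fun bag kmer =>
        if PySem.Chars.isIn [skip] kmer then bag
        else bag.insert (String.ofList kmer) (bag.getD (String.ofList kmer) 0 + 1))
      ⟨[]⟩
  bag.items

-- ===== PORT B =====
-- ''.join(c if … else repl for c in s) ported as a per-character map (exact); 'c in keep' = Chars.isIn
def clean_alt (seq : String) (is_dna : Bool) : List Char :=
  if is_dna then
    (PySem.Chars.replace (PySem.Chars.upper seq.toList) ['U'] ['T']).map
      (fun c => if PySem.Chars.isIn [c] "ACGTN".toList then c else 'N')
  else
    (PySem.Chars.replace (PySem.Chars.upper seq.toList) ['U'] ['C']).map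
      (fun c => if PySem.Chars.isIn [c] "ACDEFGHIKLMNPQRSTVWY".toList then c else 'X')

def kmer_counts_py_alt (seq : String) (k : Int) (is_dna : Bool) : List (String × Int) :=
  if k < 1 then []
  else
    let s := clean_alt seq is_dna
    let skip : Char := if is_dna then 'N' else 'X'
    let bag : PySem.Dict String Int :=
      (PySem.Chars.splitOn s [skip]).foldl
        (fun bag seg =>
          (PySem.List.pyRange 0 ((seg.length : Int) - k + 1) 1).foldl
            (fun bag i =>
              let kmer := PySem.List.slice seg (some i) (some (i + k))
              bag.insert (String.ofList kmer) (bag.getD (String.ofList kmer) 0 + 1))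
            bag)
        ⟨[]⟩
    bag.items

-- ===== PRECONDITION & SPEC =====
-- Pre_ excludes k < 1, outside the natural domain of k-mer counting (no k-mer of non-positive
-- length exists): there A returns degenerate counts of empty/truncated slices produced by
-- Python's negative slice bounds, a corner no caller would specify, while B returns {}.
def Pre_kmer_counts_py (seq : String) (k : Int) (is_dna : Bool) : Prop := 1 ≤ k
instance (seq : String) (k : Int) (is_dna : Bool) : Decidable (Pre_kmer_counts_py seq k is_dna) := by
  unfold Pre_kmer_counts_py; infer_instance

def pvWitness_kmer_counts_py : String × Int × Bool := ("ANCGT", 2, true)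

def Spec_kmer_counts_py (seq : String) (k : Int) (is_dna : Bool) (out : List (String × Int)) : Prop :=
  out = kmer_counts_py_alt seq k is_dna
instance (seq : String) (k : Int) (is_dna : Bool) (out : List (String × Int)) :
    Decidable (Spec_kmer_counts_py seq k is_dna out) := by unfold Spec_kmer_counts_py; infer_instance

-- ===== CLAIM (what is proved, stated in full; the proofs are below) =====
def Claim_equal_kmer_counts_py : Prop := ∀ (seq : String) (k : Int) (is_dna : Bool),
  Dom_kmer_counts_py seq k is_dna → Pre_kmer_counts_py seq k is_dna →
  Spec_kmer_counts_py seq k is_dna (kmer_counts_py seq k is_dna)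

-- ===== LEMMAS AND PROOFS =====

-- all valid-length windows of s (indices 0 .. |s|-kn)
def pvW (kn : Nat) (s : List Char) : List (List Char) :=
  (List.range (s.length + 1 - kn)).map (fun i => (s.drop i).take kn)

-- the windows free of the skip character x
def pvF (x : Char) (kn : Nat) (s : List Char) : List (List Char) :=
  (pvW kn s).filter (fun w => !decide (x ∈ w))

-- functional model of str.split(x) for a one-character separator
def pvSplit (x : Char) (pre : List Char) : List Char → List (List Char)
  | [] => [pre]
  | c :: rest => if c = x then pre :: pvSplit x [] rest else pvSplit x (pre ++ [c]) rest

theorem pv_infix_singleton (x : Char) (w : List Char) : [x] <:+: w ↔ x ∈ w := by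
  constructor
  · intro h; exact h.subset (List.mem_singleton_self x)
  · intro h
    obtain ⟨l, r, rfl⟩ := List.append_of_mem h
    exact ⟨l, r, by simp⟩

theorem pv_isIn_single (x : Char) (w : List Char) :
    PySem.Chars.isIn [x] w = decide (x ∈ w) := by
  by_cases h : x ∈ w
  · simp [h, PySem.Chars.isIn_iff_infix, pv_infix_singleton]
  · simp only [h, decide_false]
    rw [PySem.Chars.isIn_eq_false_iff, pv_infix_singleton]
    exact h

theorem pvW_nil (kn : Nat) (h : 1 ≤ kn) : pvW kn [] = [] := by
  simp [pvW, Nat.sub_eq_zero_of_le h]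

theorem pvW_eq_nil (kn : Nat) (s : List Char) (h : s.length + 1 ≤ kn) : pvW kn s = [] := by
  simp [pvW, Nat.sub_eq_zero_of_le h]

theorem pvW_cons (kn : Nat) (c : Char) (s : List Char) (h : kn ≤ s.length + 1) :
    pvW kn (c :: s) = ((c :: s).take kn) :: pvW kn s := by
  have hlen : (c :: s).length + 1 - kn = (s.length + 1 - kn) + 1 := by
    simp only [List.length_cons]; omega
  simp only [pvW, hlen, List.range_succ_eq_map, List.map_cons, List.map_map, List.drop_zero]
  congr 1

theorem pvF_cons (x : Char) (kn : Nat) (c : Char) (s : List Char) (h : kn ≤ s.length + 1) :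
    pvF x kn (c :: s) =
      (if x ∈ (c :: s).take kn then ([] : List (List Char)) else [(c :: s).take kn]) ++ pvF x kn s := by
  simp only [pvF, pvW_cons kn c s h, List.filter_cons]
  by_cases hx : x ∈ (c :: s).take kn <;> simp [hx]

theorem pvF_of_not_mem (x : Char) (kn : Nat) (s : List Char) (hx : x ∉ s) :
    pvF x kn s = pvW kn s := by
  apply List.filter_eq_self.2
  intro w hw
  simp only [pvW, List.mem_map] at hw
  obtain ⟨i, _, rfl⟩ := hw
  simp only [Bool.not_eq_eq_eq_not, Bool.not_true, decide_eq_false_iff_not]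
  intro hmem
  exact hx (List.mem_of_mem_drop (List.mem_of_mem_take hmem))

theorem pvF_eq_nil (x : Char) (kn : Nat) (s : List Char) (h : s.length + 1 ≤ kn) :
    pvF x kn s = [] := by
  rw [pvF, pvW_eq_nil kn s h]; rfl

-- the crux: windows of a ++ x :: t free of x are the windows of a followed by the valid windows of t
theorem pvF_append (x : Char) (kn : Nat) (hk : 1 ≤ kn) (t : List Char) :
    ∀ a : List Char, x ∉ a → pvF x kn (a ++ x :: t) = pvW kn a ++ pvF x kn t := by
  intro a
  induction a with
  | nil =>
    intro _
    rw [pvW_nil kn hk, List.nil_append, List.nil_append]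
    by_cases h : kn ≤ t.length + 1
    · rw [pvF_cons x kn x t h]
      have hmem : x ∈ (x :: t).take kn := by
        cases kn with
        | zero => omega
        | succ m => simp [List.take_succ_cons]
      simp [hmem]
    · rw [pvF_eq_nil x kn (x :: t) (by simp; omega), pvF_eq_nil x kn t (by omega)]
  | cons c a' ih =>
    intro hx
    have hxc : x ≠ c := by intro h; exact hx (by simp [h])
    have hxa' : x ∉ a' := fun h => hx (List.mem_cons_of_mem c h)
    by_cases hbig : kn ≤ (a' ++ x :: t).length + 1
    · rw [List.cons_append, pvF_cons x kn c (a' ++ x :: t) hbig, ih hxa']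
      by_cases hsm : kn ≤ a'.length + 1
      · have htake : (c :: (a' ++ x :: t)).take kn = (c :: a').take kn := by
          rw [show c :: (a' ++ x :: t) = (c :: a') ++ (x :: t) by simp,
            List.take_append_of_le_length (by simp; omega)]
        have hnm : x ∉ (c :: a').take kn := by
          intro hmem
          have hm := List.mem_of_mem_take hmem
          simp only [List.mem_cons] at hm
          rcases hm with h | h
          · exact hxc h
          · exact hxa' h
        rw [pvW_cons kn c a' hsm, htake, if_neg hnm]
        simp
      · have hW : pvW kn (c :: a') = [] := by
          apply pvW_eq_nil; simp; omega
        have hmem : x ∈ (c :: (a' ++ x :: t)).take kn := by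
          rw [show c :: (a' ++ x :: t) = (c :: a') ++ (x :: t) by simp, List.take_append]
          apply List.mem_append_right
          have h1 : 1 ≤ kn - (c :: a').length := by simp; omega
          rcases Nat.exists_eq_add_of_le h1 with ⟨m, hm⟩
          rw [Nat.add_comm] at hm
          rw [hm, List.take_succ_cons]
          exact List.mem_cons_self
        have hWa' : pvW kn a' = [] := pvW_eq_nil kn a' (by omega)
        rw [hW, hWa']
        simp [hmem]
    · rw [List.cons_append, pvF_eq_nil x kn _ (by simp at hbig ⊢; omega),
        pvW_eq_nil kn (c :: a') (by simp at hbig ⊢; omega),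
        pvF_eq_nil x kn t (by simp at hbig; omega)]
      simp

theorem pv_main (x : Char) (kn : Nat) (hk : 1 ≤ kn) :
    ∀ (l pre : List Char), x ∉ pre →
      pvF x kn (pre ++ l) = (pvSplit x pre l).flatMap (pvW kn) := by
  intro l
  induction l with
  | nil =>
    intro pre hpre
    simp [pvSplit, pvF_of_not_mem x kn pre hpre]
  | cons c rest ih =>
    intro pre hpre
    by_cases hc : c = x
    · rw [hc, pvF_append x kn hk rest pre hpre]
      have h0 := ih [] (by simp)
      rw [List.nil_append] at h0
      simp [pvSplit, h0]
    · have : pre ++ c :: rest = (pre ++ [c]) ++ rest := by simp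
      rw [this, ih (pre ++ [c]) (by
        intro hm
        rcases List.mem_append.1 hm with h | h
        · exact hpre h
        · simp only [List.mem_singleton] at h
          exact hc h.symm)]
      simp only [pvSplit, if_neg hc]

-- PySem.Chars.splitOn with a one-character separator is pvSplit
theorem pv_go_eq (x : Char) :
    ∀ (fuel : Nat) (l cur : List Char) (acc : List (List Char)), l.length < fuel →
      PySem.Chars.splitOn.go [x] fuel l cur acc = acc.reverse ++ pvSplit x cur.reverse l := by
  intro fuel
  induction fuel with
  | zero => intro l cur acc h; omega
  | succ n ih =>
    intro l cur acc h
    cases l with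
    | nil => simp [PySem.Chars.splitOn.go, pvSplit]
    | cons c rest =>
      by_cases hc : c = x
      · have hpre : List.isPrefixOf [x] (c :: rest) = true := by
          simp [List.isPrefixOf, hc]
        simp only [PySem.Chars.splitOn.go, hpre, if_pos]
        rw [show List.drop [x].length (c :: rest) = rest by simp]
        rw [ih rest [] (cur.reverse :: acc) (by simp at h; omega)]
        simp [pvSplit, hc]
      · have hpre : List.isPrefixOf [x] (c :: rest) = false := by
          simp [List.isPrefixOf]
          exact fun h => absurd h.symm hc
        simp only [PySem.Chars.splitOn.go, hpre]
        rw [if_neg (by simp [hpre])]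
        rw [ih rest (c :: cur) acc (by simp at h ⊢; omega)]
        simp [pvSplit, hc]

theorem pv_splitOn_eq (x : Char) (s : List Char) :
    PySem.Chars.splitOn s [x] = pvSplit x [] s := by
  unfold PySem.Chars.splitOn
  rw [pv_go_eq x (s.length + 1) s [] [] (by omega)]
  simp

-- the window list of a port-side slice loop is pvW
theorem pv_windows_eq (s : List Char) (k : Int) (hk : 1 ≤ k) :
    (PySem.List.pyRange 0 ((s.length : Int) - k + 1) 1).map
      (fun i => PySem.List.slice s (some i) (some (i + k))) = pvW k.toNat s := by
  rw [PySem.List.pyRange_one]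
  rw [List.map_map]
  have hcnt : (((s.length : Int) - k + 1) - 0).toNat = s.length + 1 - k.toNat := by omega
  rw [hcnt]
  unfold pvW
  apply List.map_congr_left
  intro i _
  simp only [Function.comp_apply, zero_add]
  have hkk : k = ((k.toNat : Nat) : Int) := by omega
  rw [hkk]
  exact PySem.List.slice_natCast_add s i k.toNat

-- nested segment loop = fold over the flattened window list
theorem pv_foldl_segs {β : Type} (f : β → List Char → β) (segs : List (List Char)) (kn : Nat)
    (init : β) :
    segs.foldl (fun b seg => (pvW kn seg).foldl f b) init = (segs.flatMap (pvW kn)).foldl f init := by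
  induction segs generalizing init with
  | nil => rfl
  | cons seg rest ih => simp [List.foldl_append, ih]

theorem pv_clean_eq (seq : String) (is_dna : Bool) :
    clean_alt seq is_dna = if is_dna then clean_dna_py seq else clean_aa_py seq := by
  cases is_dna
  · simp only [clean_alt, clean_dna_py, clean_aa_py, Bool.false_eq_true, if_false]
    apply List.map_congr_left
    intro c _
    rw [pv_isIn_single]
    rw [show ("ACDEFGHIKLMNPQRSTVWY".toList : List Char) = pvAA_ALPHABET.toList from rfl]
    simp
  · simp only [clean_alt, clean_dna_py, clean_aa_py, if_true]
    apply List.map_congr_left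
    intro c _
    rw [pv_isIn_single]
    rw [show ("ACGTN".toList : List Char) = ['A', 'C', 'G', 'T', 'N'] from rfl]
    simp

-- the core equality of the two dictionary-building loops, for k ≥ 1
theorem pv_core (s : List Char) (x : Char) (k : Int) (hk : 1 ≤ k) :
    ((PySem.List.pyRange 0 ((s.length : Int) - k + 1) 1).map
        (fun i => PySem.List.slice s (some i) (some (i + k)))).foldl
      (fun bag kmer =>
        if PySem.Chars.isIn [x] kmer then bag
        else bag.insert (String.ofList kmer) (bag.getD (String.ofList kmer) 0 + 1))
      (⟨[]⟩ : PySem.Dict String Int)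
    =
    (PySem.Chars.splitOn s [x]).foldl
      (fun bag seg =>
        (PySem.List.pyRange 0 ((seg.length : Int) - k + 1) 1).foldl
          (fun bag i =>
            bag.insert (String.ofList (PySem.List.slice seg (some i) (some (i + k))))
              (bag.getD (String.ofList (PySem.List.slice seg (some i) (some (i + k)))) 0 + 1))
          bag)
      ⟨[]⟩ := by
  have hk1 : 1 ≤ k.toNat := by omega
  -- left side: filter out windows containing x, fold the counter
  rw [pv_windows_eq s k hk]
  have hguard :
      (pvW k.toNat s).foldl
        (fun bag kmer =>
          if PySem.Chars.isIn [x] kmer then bag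
          else bag.insert (String.ofList kmer) (bag.getD (String.ofList kmer) 0 + 1))
        (⟨[]⟩ : PySem.Dict String Int)
      = (pvF x k.toNat s).foldl
          (fun bag kmer => bag.insert (String.ofList kmer) (bag.getD (String.ofList kmer) 0 + 1)) ⟨[]⟩ := by
    unfold pvF
    rw [← PySem.List.foldl_if_eq_foldl_filter]
    apply PySem.List.foldl_congr_mem
    intro acc w _
    rw [pv_isIn_single]
    by_cases hw : x ∈ w <;> simp [hw]
  rw [hguard]
  -- right side: each inner loop is a fold over pvW of the segment
  have hinner : ∀ (init : PySem.Dict String Int),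
      (PySem.Chars.splitOn s [x]).foldl
        (fun bag seg =>
          (PySem.List.pyRange 0 ((seg.length : Int) - k + 1) 1).foldl
            (fun bag i =>
              bag.insert (String.ofList (PySem.List.slice seg (some i) (some (i + k))))
                (bag.getD (String.ofList (PySem.List.slice seg (some i) (some (i + k)))) 0 + 1))
            bag)
        init
      = (PySem.Chars.splitOn s [x]).foldl
          (fun bag seg => (pvW k.toNat seg).foldl
            (fun bag kmer => bag.insert (String.ofList kmer) (bag.getD (String.ofList kmer) 0 + 1)) bag)
          init := by
    intro init
    apply PySem.List.foldl_congr_mem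
    intro acc seg _
    rw [← pv_windows_eq seg k hk, List.foldl_map]
  rw [hinner]
  rw [pv_foldl_segs]
  rw [pv_splitOn_eq x s]
  rw [← pv_main x k.toNat hk1 s [] (by simp)]
  rw [List.nil_append]

theorem pv_unchanged (seq : String) (k : Int) (is_dna : Bool) (hk : 1 ≤ k) :
    kmer_counts_py seq k is_dna = kmer_counts_py_alt seq k is_dna := by
  unfold kmer_counts_py kmer_counts_py_alt iter_kmers_py
  rw [if_neg (by omega : ¬ k < 1)]
  rw [pv_clean_eq seq is_dna]
  cases is_dna <;> simp only [Bool.false_eq_true, if_true, if_false] <;>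
    exact congrArg PySem.Dict.items (pv_core _ _ k hk)

-- ===== VERDICT (by name: the statement is the Claim_ definition above) =====
theorem kmer_counts_py_spec : Claim_equal_kmer_counts_py := by
  intro seq k is_dna _ hPre
  unfold Pre_kmer_counts_py at hPre
  unfold Spec_kmer_counts_py
  exact pv_unchanged seq k is_dna hPre
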